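-- pv_equiv track=rewrite | github.com/BekirZahid/MiniProjects | MiniProject #5/guessing_department.py | Determine_department
-- ===== SOURCE A (Python) =====
-- import copy
--
-- def Determine_department(list1):
--     del list1[0]
--     list_help=[]
--     for i in range(len(list1)-1):
--         if list1[i].isupper()==True:
--             if list1[i+1].isupper()==False:
--                 list_help.append(i)
--     k=copy.deepcopy(list1)
--     for index in list_help:
--         list1.remove(k[index])
--     return list1
-- ===== SOURCE B (Python) =====
-- def Determine_department(list1):
--     del list1[0]
--     counts = {}
--     for cur, nxt in zip(list1, list1[1:]):
--         if cur.isupper() and not nxt.isupper():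
--             counts[cur] = counts.get(cur, 0) + 1
--     kept = []
--     for x in list1:
--         if counts.get(x, 0) > 0:
--             counts[x] -= 1
--         else:
--             kept.append(x)
--     list1[:] = kept
--     return list1
-- ===== Notes on version B (the rewrite author's own statement) =====
-- stated objective: faster
-- what changed: Replaces the quadratic index-list + repeated value-based list.remove with a single count table of the values at upper-to-lower transition positions followed by one linear rebuilding pass that skips the first c_v occurrences of each counted value; Pre_ excludes only the empty list, on which A's 'del list1[0]' raises IndexError (B raises there too).
import Mathlib
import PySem

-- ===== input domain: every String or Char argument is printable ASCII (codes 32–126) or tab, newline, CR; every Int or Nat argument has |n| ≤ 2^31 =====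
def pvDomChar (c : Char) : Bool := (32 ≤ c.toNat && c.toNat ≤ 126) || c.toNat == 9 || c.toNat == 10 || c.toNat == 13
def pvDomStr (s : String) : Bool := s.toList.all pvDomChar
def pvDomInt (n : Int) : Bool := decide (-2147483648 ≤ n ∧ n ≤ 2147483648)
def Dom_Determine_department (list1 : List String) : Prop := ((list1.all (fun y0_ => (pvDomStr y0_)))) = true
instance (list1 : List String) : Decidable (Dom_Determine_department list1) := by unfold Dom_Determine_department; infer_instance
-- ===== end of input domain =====

-- B replaces A's quadratic index-list + repeated list.remove with a count table of the transition
-- values and one linear rebuilding pass (objective: faster). Both Pythons mutate list1 in place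
-- identically (delete the head, then leave the same final contents); the theorems are about the return value.

-- str.isupper() on the ASCII domain: at least one cased character and no lowercase one (used by both ports)
def pyStrIsupper (s : String) : Bool :=
  s.toList.any PySem.Chars.isupper && s.toList.all (fun c => !(PySem.Chars.islower c))

-- ===== PORT A =====
def Determine_department (list1 : List String) : List String :=
  let t := list1.drop 1          -- del list1[0]   (list1 = [] raises IndexError: excluded by Pre_)
  -- the indices produced by range(len(t)-1) are always in range, so pyGetD is exact here
  let listHelp := (PySem.List.pyRange 0 ((t.length : Int) - 1) 1).foldl
    (fun acc i =>
      if pyStrIsupper (PySem.List.pyGetD t i "") = true then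
        if pyStrIsupper (PySem.List.pyGetD t (i + 1) "") = false then acc ++ [i] else acc
      else acc) []
  let k := t                     -- k = copy.deepcopy(list1)
  -- each list1.remove(k[index]) succeeds (the value is present), so .getD cur is never the fallback
  listHelp.foldl (fun cur idx => (PySem.List.remove? cur (PySem.List.pyGetD k idx "")).getD cur) t

-- ===== PORT B =====
def Determine_department_alt (list1 : List String) : List String :=
  let t := list1.drop 1          -- del list1[0]
  let counts := (t.zip (t.drop 1)).foldl
    (fun d pr =>
      if pyStrIsupper pr.1 && !(pyStrIsupper pr.2) then
        d.insert pr.1 (d.getD pr.1 0 + 1)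
      else d)
    (PySem.Dict.empty (κ := String) (ν := Int))
  let fin := t.foldl
    (fun (p : List String × PySem.Dict String Int) x =>
      if p.2.getD x 0 > 0 then (p.1, p.2.insert x (p.2.getD x 0 - 1))
      else (p.1 ++ [x], p.2))
    ([], counts)
  fin.1

-- ===== PRECONDITION & SPEC =====
-- Pre_ excludes only the empty list, on which A's 'del list1[0]' raises IndexError (B raises there too).
def Pre_Determine_department (list1 : List String) : Prop := list1 ≠ []
instance (list1 : List String) : Decidable (Pre_Determine_department list1) := by unfold Pre_Determine_department; infer_instance
def pvWitness_Determine_department : List String := ["dept", "AB", "ab", "AB"]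

def Spec_Determine_department (list1 : List String) (out : List String) : Prop := out = Determine_department_alt list1
instance (list1 : List String) (out : List String) : Decidable (Spec_Determine_department list1 out) := by unfold Spec_Determine_department; infer_instance

-- ===== CLAIM (what is proved, stated in full; the proofs are below) =====
def Claim_equal_Determine_department : Prop := ∀ (list1 : List String), Dom_Determine_department list1 → Pre_Determine_department list1 → Spec_Determine_department list1 (Determine_department list1)

-- ===== LEMMAS AND PROOFS =====

-- the transition test on a pair of adjacent elements
def transTest (pr : String × String) : Bool := pyStrIsupper pr.1 && !(pyStrIsupper pr.2)

-- the multiset of values A removes / B counts: first components of adjacent pairs passing the test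
def transVals (t : List String) : List String :=
  ((t.zip (t.drop 1)).filter transTest).map Prod.fst

-- keep the elements of t, skipping the first (c v) occurrences of each value v
def skipC : List String → (String → Nat) → List String
  | [], _ => []
  | x :: xs, c =>
      if c x > 0 then skipC xs (fun v => if v = x then c v - 1 else c v)
      else x :: skipC xs c

lemma skipC_zero (t : List String) : skipC t (fun _ => 0) = t := by
  induction t with
  | nil => rfl
  | cons x xs ih => simp [skipC, ih]

-- removing the leftmost occurrence of v first = counting one more occurrence of v to skip
lemma skip_erase (v : String) (t : List String) (hv : v ∈ t) (c : String → Nat) :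
    skipC (t.erase v) c = skipC t (fun w => if w = v then c w + 1 else c w) := by
  induction t generalizing c with
  | nil => cases hv
  | cons x xs ih =>
    by_cases hxv : x = v
    · subst hxv
      rw [List.erase_cons_head]
      simp only [skipC]
      have : (fun w => if w = x then (if w = x then c w + 1 else c w) - 1 else (if w = x then c w + 1 else c w)) = c := by
        funext w; by_cases hw : w = x <;> simp [hw]
      simp [this]
    · have hv' : v ∈ xs := by
        rcases List.mem_cons.mp hv with h | h
        · exact absurd h.symm hxv
        · exact h
      rw [List.erase_cons_tail (by simp [hxv])]
      simp only [skipC]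
      have hx : (if x = v then c x + 1 else c x) = c x := by simp [hxv]
      rw [hx]
      by_cases hcx : c x > 0
      · rw [if_pos hcx, if_pos hcx, ih hv']
        congr 1
        funext w
        have hvx : v ≠ x := fun h => hxv h.symm
        by_cases hw : w = v <;> by_cases hwx : w = x <;> simp [hw, hwx, hxv, hvx]
      · rw [if_neg hcx, if_neg hcx, ih hv']

-- A's removal loop: repeated leftmost value-removal = skipping the first (count) occurrences
lemma remove_foldl (vs t : List String) (h : ∀ v, vs.count v ≤ t.count v) :
    vs.foldl (fun cur v => (PySem.List.remove? cur v).getD cur) t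
      = skipC t (fun v => vs.count v) := by
  induction vs generalizing t with
  | nil =>
    simp only [List.foldl_nil]
    have hz : (fun v : String => List.count v ([] : List String)) = fun _ => 0 := by
      funext v; simp
    rw [hz, skipC_zero]
  | cons v rest ih =>
    have hvmem : v ∈ t := by
      have := h v
      simp [List.count_cons_self] at this
      have h0 : 0 < t.count v := by omega
      exact List.count_pos_iff.mp h0
    rw [List.foldl_cons, PySem.List.remove?_eq_some_erase t v hvmem, Option.getD_some]
    rw [ih (t.erase v) (by
      intro w
      by_cases hw : w = v
      · subst hw
        rw [List.count_erase_self]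
        have := h w
        simp [List.count_cons_self] at this
        omega
      · rw [List.count_erase_of_ne hw]
        have := h w
        have hv : v ≠ w := fun hh => hw hh.symm
        simpa [List.count_cons, hv] using this)]
    rw [skip_erase v t hvmem]
    congr 1
    funext w
    by_cases hw : w = v
    · simp [hw]
    · simp [hw, (show v ≠ w from fun hh => hw hh.symm)]

-- B's rebuilding pass computes skipC, with the dict tracking the remaining counts
lemma pass_eq (t : List String) (acc : List String) (d : PySem.Dict String Int)
    (c : String → Nat) (hd : ∀ v, d.getD v 0 = (c v : Int)) :
    (t.foldl
      (fun (p : List String × PySem.Dict String Int) x =>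
        if p.2.getD x 0 > 0 then (p.1, p.2.insert x (p.2.getD x 0 - 1))
        else (p.1 ++ [x], p.2))
      (acc, d)).1 = acc ++ skipC t c := by
  induction t generalizing acc d c with
  | nil => simp [skipC]
  | cons x xs ih =>
    simp only [List.foldl_cons, skipC]
    by_cases hcx : c x > 0
    · rw [if_pos (by rw [hd x]; exact_mod_cast hcx), if_pos hcx]
      exact ih acc _ _ (by
        intro v
        rw [PySem.Dict.getD_insert, hd x]
        by_cases hv : v = x
        · simp [hv]; omega
        · simp [hv, hd v])
    · rw [if_neg (by rw [hd x]; omega), if_neg hcx]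
      rw [ih (acc ++ [x]) d c hd, List.append_assoc]
      rfl

lemma map_fst_zip_sublist {α β : Type} (t : List α) (u : List β) :
    ((t.zip u).map Prod.fst).Sublist t := by
  induction t generalizing u with
  | nil => simp
  | cons x xs ih =>
    cases u with
    | nil => simp
    | cons y us => simpa using List.Sublist.cons₂ x (ih us)

lemma transVals_count_le (t : List String) (v : String) :
    (transVals t).count v ≤ t.count v := by
  have h1 : (transVals t).Sublist ((t.zip (t.drop 1)).map Prod.fst) :=
    List.Sublist.map Prod.fst (List.filter_sublist)
  exact (h1.trans (map_fst_zip_sublist t (t.drop 1))).count_le v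

-- B's counting loop builds exactly the occurrence counts of transVals
lemma counts_eq (t : List String) (v : String) :
    ((t.zip (t.drop 1)).foldl
      (fun d pr =>
        if pyStrIsupper pr.1 && !(pyStrIsupper pr.2) then
          d.insert pr.1 (d.getD pr.1 0 + 1)
        else d)
      (PySem.Dict.empty (κ := String) (ν := Int))).getD v 0 = ((transVals t).count v : Int) := by
  rw [PySem.List.foldl_if_eq_foldl_filter]
  rw [show ((t.zip (t.drop 1)).filter fun pr => pyStrIsupper pr.1 && !(pyStrIsupper pr.2))
       = (t.zip (t.drop 1)).filter transTest from rfl]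
  rw [← List.foldl_map (f := Prod.fst)
      (g := fun (d : PySem.Dict String Int) x => d.insert x (d.getD x 0 + 1))]
  rw [PySem.Dict.getD_foldl_insert_add_one]
  simp [transVals, PySem.Dict.getD_empty]

lemma range_zip (t : List String) :
    (List.range (t.length - 1)).map (fun i => (t.getD i "", t.getD (i + 1) "")) = t.zip (t.drop 1) := by
  apply List.ext_getElem
  · simp [List.length_zip]
  · intro i h1 h2
    simp only [List.getElem_map, List.getElem_range, List.getElem_zip, List.getElem_drop]
    have hlen : i < t.length - 1 := by simpa using h1
    rw [List.getD_eq_getElem t "" (by omega), List.getD_eq_getElem t "" (by omega)]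
    simp [Nat.add_comm]

-- A's index-collecting loop, read off as the values at those indices
lemma listHelp_vals (t : List String) :
    (((PySem.List.pyRange 0 ((t.length : Int) - 1) 1).foldl
      (fun acc i =>
        if pyStrIsupper (PySem.List.pyGetD t i "") = true then
          if pyStrIsupper (PySem.List.pyGetD t (i + 1) "") = false then acc ++ [i] else acc
        else acc) []).map (fun i => PySem.List.pyGetD t i "")) = transVals t := by
  have hstep : (fun (acc : List Int) (i : Int) =>
        if pyStrIsupper (PySem.List.pyGetD t i "") = true then
          if pyStrIsupper (PySem.List.pyGetD t (i + 1) "") = false then acc ++ [i] else acc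
        else acc)
      = fun acc i =>
        if (pyStrIsupper (PySem.List.pyGetD t i "") && !(pyStrIsupper (PySem.List.pyGetD t (i + 1) ""))) then acc ++ [i] else acc := by
    funext acc i
    cases pyStrIsupper (PySem.List.pyGetD t i "") <;>
      cases pyStrIsupper (PySem.List.pyGetD t (i + 1) "") <;> simp
  rw [hstep, PySem.List.foldl_append_if_eq_filter, List.nil_append]
  cases t with
  | nil => simp [PySem.List.pyRange_one_eq_nil (by norm_num : (-1 : Int) ≤ 0), transVals]
  | cons a as =>
    have hcast : ((((a :: as).length : Int)) - 1) = (((a :: as).length - 1 : Nat) : Int) := by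
      simp
    rw [hcast, PySem.List.pyRange_zero_natCast, List.filter_map, List.map_map]
    set n := (a :: as).length - 1 with hn
    set t' := a :: as with ht'
    have hcomp : ∀ (i : Nat),
        ((fun i : Int => (pyStrIsupper (PySem.List.pyGetD t' i "") && !(pyStrIsupper (PySem.List.pyGetD t' (i + 1) "")))) ∘ (fun k : Nat => (k : Int))) i
        = transTest (t'.getD i "", t'.getD (i + 1) "") := by
      intro i
      have h2 : ((i : Int) + 1) = ((i + 1 : Nat) : Int) := by push_cast; ring
      simp only [Function.comp, PySem.List.pyGetD_natCast, h2, transTest]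
    have hmapc : ∀ (i : Nat),
        ((fun i : Int => PySem.List.pyGetD t' i "") ∘ (fun k : Nat => (k : Int))) i = t'.getD i "" := by
      intro i; simp [PySem.List.pyGetD_natCast]
    rw [List.filter_congr (fun i _ => hcomp i), List.map_congr_left (fun i _ => hmapc i)]
    have hff : ((List.range n).filter (fun i => transTest (t'.getD i "", t'.getD (i + 1) ""))).map (fun i => t'.getD i "")
        = (((List.range n).map (fun i => (t'.getD i "", t'.getD (i + 1) ""))).filter transTest).map Prod.fst := by
      rw [List.filter_map, List.map_map]
      rfl
    rw [hff, hn, range_zip t']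
    rfl

lemma ports_agree (list1 : List String) :
    Determine_department list1 = Determine_department_alt list1 := by
  unfold Determine_department Determine_department_alt
  set t := list1.drop 1 with ht
  rw [← List.foldl_map (f := fun i => PySem.List.pyGetD t i "")
      (g := fun cur v => (PySem.List.remove? cur v).getD cur)]
  rw [listHelp_vals t]
  rw [remove_foldl _ _ (transVals_count_le t)]
  rw [pass_eq t [] _ (fun v => (transVals t).count v) (fun v => counts_eq t v), List.nil_append]

-- ===== VERDICT (by name: the statement is the Claim_ definition above) =====
theorem Determine_department_spec : Claim_equal_Determine_department := by
  intro list1 _ _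
  unfold Spec_Determine_department
  exact ports_agree list1
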